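-- pv_equiv track=rewrite | github.com/pypi-data/pypi-mirror-232 | packages/py2docfx/py2docfx-0.1.0.dev1464542-py3-none-any.whl/py2docfx/docfx_yaml/parameter_utils.py | process_complex_type
-- ===== SOURCE A (Python) =====
-- def process_complex_type(type_string: str) -> str:
--     # replace "or" with ","
--     type_string = type_string.replace(" or ", ",")
--
--     result = ""
--     skip_list = ["[", "]", "(", ")", ","]
--     in_skip_zone = False
--     for char in type_string:
--         if (char not in skip_list) and (not in_skip_zone):
--             result += "<xref:" + char
--             in_skip_zone = True
--         elif (char in skip_list) and (in_skip_zone):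
--             result += ">" + char
--             in_skip_zone = False
--         else:
--             result += char
--     if result[-1].isalpha():
--         result += ">"
--     return result
-- ===== SOURCE B (Python) =====
-- def process_complex_type(type_string: str) -> str:
--     s = type_string.replace(" or ", ",")
--     delims = "[](),"
--     parts = []
--     i = 0
--     n = len(s)
--     while i < n:
--         if s[i] in delims:
--             parts.append(s[i])
--             i += 1
--         else:
--             j = i + 1
--             while j < n and s[j] not in delims:
--                 j += 1
--             parts.append("<xref:" + s[i:j] + ("" if j == n else ">"))
--             i = j
--     out = "".join(parts)
--     if out[-1].isalpha():
--         out += ">"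
--     return out
-- ===== Notes on version B (the rewrite author's own statement) =====
-- stated objective: alternative
-- what changed: Replaces the per-character boolean state machine with a run-grouping scan that finds each maximal non-delimiter run and wraps it in one step, joining the pieces at the end.
import Mathlib
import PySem

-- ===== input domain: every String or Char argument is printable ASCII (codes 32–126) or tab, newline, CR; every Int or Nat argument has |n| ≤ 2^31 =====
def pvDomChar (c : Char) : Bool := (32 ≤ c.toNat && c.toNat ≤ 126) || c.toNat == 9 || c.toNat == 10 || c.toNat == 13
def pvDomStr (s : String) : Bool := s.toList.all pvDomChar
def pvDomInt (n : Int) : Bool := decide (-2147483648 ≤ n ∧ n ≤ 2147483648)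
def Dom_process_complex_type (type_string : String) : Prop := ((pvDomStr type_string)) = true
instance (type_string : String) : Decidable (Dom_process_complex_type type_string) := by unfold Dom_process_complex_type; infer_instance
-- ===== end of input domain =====

-- B replaces A's per-character in_skip_zone state machine by a run-grouping scan (alternative, same cost).

-- ===== PORT A =====
def pvSkip (c : Char) : Bool := c = '[' || c = ']' || c = '(' || c = ')' || c = ','

-- A's for-loop: state = (result, in_skip_zone)
def pvALoop : List Char → List Char → Bool → List Char × Bool
  | [], res, zone => (res, zone)
  | c :: rest, res, zone =>
    if !pvSkip c && !zone then pvALoop rest (res ++ ('<' :: 'x' :: 'r' :: 'e' :: 'f' :: ':' :: [c])) true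
    else if pvSkip c && zone then pvALoop rest (res ++ ['>', c]) false
    else pvALoop rest (res ++ [c]) zone

def process_complex_type (type_string : String) : String :=
  let ts := PySem.Str.replace type_string " or " ","
  let res := (pvALoop ts.toList [] false).1
  -- result[-1].isalpha(): IndexError on empty result, excluded by Pre_ (none ↦ false here)
  let res := if (PySem.List.pyGet? res (-1)).elim false PySem.Chars.isalpha then res ++ ['>'] else res
  String.mk res

-- ===== PORT B =====
-- B's outer while-loop: emit each delimiter as is, wrap each maximal non-delimiter run
def pvBRuns : List Char → List Char
  | [] => []
  | c :: rest =>
    if pvSkip c then c :: pvBRuns rest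
    else
      let rest' := rest.dropWhile (fun x => !pvSkip x)
      ('<' :: 'x' :: 'r' :: 'e' :: 'f' :: ':' :: [])
        ++ (c :: rest.takeWhile (fun x => !pvSkip x))
        ++ (if rest' = [] then [] else ['>'])
        ++ pvBRuns rest'
  termination_by cs => cs.length
  decreasing_by
    · simp only [List.length_cons]; omega
    · have := List.length_dropWhile_le (fun x => !pvSkip x) rest
      simp only [List.length_cons]; omega

def process_complex_type_alt (type_string : String) : String :=
  let s := PySem.Str.replace type_string " or " ","
  let out := pvBRuns s.toList
  let out := if (PySem.List.pyGet? out (-1)).elim false PySem.Chars.isalpha then out ++ ['>'] else out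
  String.mk out

-- ===== PRECONDITION & SPEC =====
-- A raises IndexError (result[-1]) exactly on the empty string; B raises there too.
def Pre_process_complex_type (type_string : String) : Prop := type_string ≠ ""
instance (type_string : String) : Decidable (Pre_process_complex_type type_string) := by unfold Pre_process_complex_type; infer_instance
def pvWitness_process_complex_type : String := "list[int] or str"

def Spec_process_complex_type (type_string : String) (out : String) : Prop := out = process_complex_type_alt type_string
instance (type_string : String) (out : String) : Decidable (Spec_process_complex_type type_string out) := by unfold Spec_process_complex_type; infer_instance

-- ===== CLAIM (what is proved, stated in full; the proofs are below) =====
def Claim_equal_process_complex_type : Prop := ∀ (type_string : String), Dom_process_complex_type type_string → Pre_process_complex_type type_string → Spec_process_complex_type type_string (process_complex_type type_string)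

-- ===== LEMMAS AND PROOFS =====

-- The state machine, started out of (resp. inside) a skip zone, produces B's run decomposition.
theorem pvALoop_eq_pvBRuns (cs : List Char) :
    (∀ acc, (pvALoop cs acc false).1 = acc ++ pvBRuns cs) ∧
    (∀ acc, (pvALoop cs acc true).1 =
      acc ++ cs.takeWhile (fun x => !pvSkip x)
          ++ (if cs.dropWhile (fun x => !pvSkip x) = [] then [] else ['>'])
          ++ pvBRuns (cs.dropWhile (fun x => !pvSkip x))) := by
  induction cs with
  | nil => simp [pvALoop, pvBRuns]
  | cons c rest ih =>
    obtain ⟨ihF, ihG⟩ := ih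
    by_cases hc : pvSkip c = true
    · constructor
      · intro acc
        simp [pvALoop, hc, pvBRuns, ihF]
      · intro acc
        simp [pvALoop, hc, List.takeWhile_cons, List.dropWhile_cons, ihF, pvBRuns]
    · simp only [Bool.not_eq_true] at hc
      constructor
      · intro acc
        simp [pvALoop, hc, pvBRuns, ihG, List.append_assoc]
      · intro acc
        simp [pvALoop, hc, List.takeWhile_cons, List.dropWhile_cons, ihG, List.append_assoc]

-- ===== VERDICT (by name: the statement is the Claim_ definition above) =====
theorem process_complex_type_spec : Claim_equal_process_complex_type := by
  intro type_string _ _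
  unfold Spec_process_complex_type process_complex_type process_complex_type_alt
  simp only [(pvALoop_eq_pvBRuns (PySem.Str.replace type_string " or " ",").toList).1,
    List.nil_append]
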